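-- pv_equiv track=rewrite | github.com/H-Wol/algorithmStudy | baekjoon/silver/2491_수열.py | find_min_length
-- ===== SOURCE A (Python) =====
-- def find_min_length(nums):
--     min_length = 1
--     current_length = 1
--
--     for i in range(1, len(nums)):
--         if nums[i] <= nums[i - 1]:
--             current_length += 1
--         else:
--             current_length = 1
--
--         min_length = max(min_length, current_length)
--
--     return min_length
-- ===== SOURCE B (Python) =====
-- def max_gap(bounds):
--     return max(b - a for a, b in zip(bounds, bounds[1:]))
--
--
-- def find_min_length(nums):
--     if not nums:
--         return 1
--     bounds = [0]
--     for i in range(1, len(nums)):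
--         if nums[i] > nums[i - 1]:
--             bounds.append(i)
--     bounds.append(len(nums))
--     return max_gap(bounds)
-- ===== Notes on version B (the rewrite author's own statement) =====
-- stated objective: alternative
-- what changed: Replaces A's running counter/maximum loop by a two-phase decomposition: first collect the run-boundary indices (positions where the sequence strictly increases), then return the maximum gap between consecutive boundaries.
import Mathlib
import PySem

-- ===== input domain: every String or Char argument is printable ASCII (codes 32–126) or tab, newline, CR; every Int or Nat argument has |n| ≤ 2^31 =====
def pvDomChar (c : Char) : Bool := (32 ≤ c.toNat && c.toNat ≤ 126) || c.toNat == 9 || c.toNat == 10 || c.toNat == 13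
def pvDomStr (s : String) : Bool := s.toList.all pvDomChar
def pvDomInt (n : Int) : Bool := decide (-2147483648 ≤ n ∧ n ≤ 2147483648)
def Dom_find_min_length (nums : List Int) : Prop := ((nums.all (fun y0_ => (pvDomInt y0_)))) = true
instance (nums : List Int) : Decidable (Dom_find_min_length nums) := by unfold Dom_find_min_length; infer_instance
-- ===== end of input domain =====

-- B replaces A's running counter/maximum with a two-phase decomposition: collect run-boundary
-- indices, then take the maximum gap between consecutive boundaries (alternative, same cost).

-- ===== PORT A =====
def find_min_length (nums : List Int) : Int :=
  ((PySem.List.pyRange 1 (PySem.List.len nums) 1).foldl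
    (fun (p : Int × Int) i =>
      let current := if PySem.List.pyGetD nums i 0 ≤ PySem.List.pyGetD nums (i - 1) 0 then p.2 + 1 else 1
      (max p.1 current, current)) ((1 : Int), (1 : Int))).1

-- ===== PORT B =====
-- helper max_gap(bounds) = max(b - a for a, b in zip(bounds, bounds[1:])); at its call site
-- bounds has ≥ 2 elements, so the diff list is nonempty and max? is some
def max_gap (bounds : List Int) : Int :=
  (PySem.List.max? ((bounds.zip (bounds.drop 1)).map (fun p => p.2 - p.1)) (fun y => y)).getD 0

def find_min_length_alt (nums : List Int) : Int :=
  if nums = [] then 1 else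
  max_gap ((PySem.List.pyRange 1 (PySem.List.len nums) 1).foldl
      (fun acc i => if PySem.List.pyGetD nums (i - 1) 0 < PySem.List.pyGetD nums i 0 then acc ++ [i] else acc)
      [(0 : Int)] ++ [PySem.List.len nums])

-- ===== PRECONDITION & SPEC =====
def Spec_find_min_length (nums : List Int) (out : Int) : Prop := out = find_min_length_alt nums
instance (nums : List Int) (out : Int) : Decidable (Spec_find_min_length nums out) := by unfold Spec_find_min_length; infer_instance

-- ===== CLAIM (what is proved, stated in full; the proofs are below) =====
def Claim_equal_find_min_length : Prop := ∀ (nums : List Int), Dom_find_min_length nums → Spec_find_min_length nums (find_min_length nums)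

-- ===== LEMMAS AND PROOFS =====

-- Both ports fold over range(1, len(nums)) reading nums[i-1] and nums[i]; adjFoldI is that
-- loop shape as structural recursion over the list, threading the index.
def adjFoldI {β : Type} (F : β → Int → Int → Int → β) : List Int → Int → β → β
  | x :: y :: ys, i, init => adjFoldI F (y :: ys) (i + 1) (F init i x y)
  | _, _, init => init

lemma pyGetD_cons_succ (x : Int) (l : List Int) (k : Nat) (d : Int) :
    PySem.List.pyGetD (x :: l) ((k : Int) + 1) d = PySem.List.pyGetD l (k : Int) d := by
  have h : ((k : Int) + 1) = ((k + 1 : Nat) : Int) := by push_cast; ring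
  rw [h, PySem.List.pyGetD_natCast, PySem.List.pyGetD_natCast]
  rfl

lemma foldl_range_adj {β : Type} (F : β → Int → Int → Int → β) :
    ∀ (xs : List Int) (x : Int) (s : Int) (init : β),
    (List.range xs.length).foldl
      (fun (acc : β) (k : Nat) => F acc (s + (k : Int)) (PySem.List.pyGetD (x :: xs) (k : Int) 0)
        (PySem.List.pyGetD (x :: xs) ((k : Int) + 1) 0)) init
    = adjFoldI F (x :: xs) s init := by
  intro xs
  induction xs with
  | nil => intro x s init; rfl
  | cons y ys ih =>
    intro x s init
    rw [show (y :: ys).length = ys.length + 1 from rfl, List.range_succ_eq_map,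
      List.foldl_cons, List.foldl_map]
    have h0 : F init (s + ((0 : Nat) : Int)) (PySem.List.pyGetD (x :: y :: ys) ((0 : Nat) : Int) 0)
        (PySem.List.pyGetD (x :: y :: ys) (((0 : Nat) : Int) + 1) 0) = F init s x y := by
      rw [show (((0 : Nat) : Int) + 1) = ((0 : Int) + 1) from by norm_num,
        show ((0 : Int) + 1) = (((0 : Nat) : Int) + 1) from by norm_num,
        pyGetD_cons_succ x (y :: ys) 0]
      norm_num [PySem.List.pyGetD_zero_cons]
    have hfun : (fun (acc : β) (k : Nat) => F acc (s + ((k.succ : Nat) : Int))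
          (PySem.List.pyGetD (x :: y :: ys) ((k.succ : Nat) : Int) 0)
          (PySem.List.pyGetD (x :: y :: ys) (((k.succ : Nat) : Int) + 1) 0))
        = (fun (acc : β) (k : Nat) => F acc ((s + 1) + (k : Int))
          (PySem.List.pyGetD (y :: ys) (k : Int) 0)
          (PySem.List.pyGetD (y :: ys) ((k : Int) + 1) 0)) := by
      funext acc k
      have e1 : ((k.succ : Nat) : Int) = (k : Int) + 1 := by push_cast; ring
      have e2 : (((k.succ : Nat) : Int) + 1) = ((k + 1 : Nat) : Int) + 1 := by push_cast; ring
      rw [e2, pyGetD_cons_succ x (y :: ys) (k + 1), e1, pyGetD_cons_succ x (y :: ys) k]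
      rw [show s + ((k : Int) + 1) = s + 1 + (k : Int) from by ring]
    rw [h0, hfun, ih y (s + 1) (F init s x y)]
    rfl

lemma foldl_pyRange_adj {β : Type} (F : β → Int → Int → Int → β) (nums : List Int) (init : β) :
    (PySem.List.pyRange 1 (PySem.List.len nums) 1).foldl
      (fun acc i => F acc i (PySem.List.pyGetD nums (i - 1) 0) (PySem.List.pyGetD nums i 0)) init
    = adjFoldI F nums 1 init := by
  cases nums with
  | nil =>
    rw [show PySem.List.len ([] : List Int) = 0 from rfl, PySem.List.pyRange_one_eq_nil (by norm_num)]
    rfl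
  | cons x xs =>
    rw [PySem.List.pyRange_one,
      show (PySem.List.len (x :: xs) - 1).toNat = xs.length from by
        simp only [PySem.List.len_eq, List.length_cons]; omega]
    rw [List.foldl_map]
    have hfun : (fun (acc : β) (k : Nat) => F acc (1 + (k : Int))
          (PySem.List.pyGetD (x :: xs) (1 + (k : Int) - 1) 0)
          (PySem.List.pyGetD (x :: xs) (1 + (k : Int)) 0))
        = (fun (acc : β) (k : Nat) => F acc (1 + (k : Int))
          (PySem.List.pyGetD (x :: xs) ((k : Int)) 0)
          (PySem.List.pyGetD (x :: xs) ((k : Int) + 1) 0)) := by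
      funext acc k
      rw [show 1 + (k : Int) - 1 = (k : Int) from by ring,
        show 1 + (k : Int) = (k : Int) + 1 from by ring]
    rw [hfun]
    exact foldl_range_adj F xs x 1 init

-- consecutive differences, as structural recursion
def gaps : List Int → List Int
  | a :: b :: t => (b - a) :: gaps (b :: t)
  | _ => []

-- max of a nonempty list, Python style (junk 0 on [])
def bmax : List Int → Int
  | [] => 0
  | g :: t => t.foldl max g

lemma zip_diff_eq_gaps : ∀ l : List Int, ((l.zip (l.drop 1)).map (fun p => p.2 - p.1)) = gaps l := by
  intro l
  induction l with
  | nil => rfl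
  | cons a t ih =>
    cases t with
    | nil => rfl
    | cons b r => simpa [gaps] using ih

lemma max?_id_getD_eq_bmax (l : List Int) : (PySem.List.max? l (fun y => y)).getD 0 = bmax l := by
  cases l with
  | nil => rfl
  | cons g t => rw [PySem.List.max?_id_cons]; rfl

lemma length_gaps : ∀ l : List Int, (gaps l).length = l.length - 1 := by
  intro l
  induction l with
  | nil => rfl
  | cons a t ih =>
    cases t with
    | nil => rfl
    | cons b r => simpa [gaps] using ih

lemma gaps_append_append (x n : Int) : ∀ l : List Int, gaps ((l ++ [x]) ++ [n]) = gaps (l ++ [x]) ++ [n - x] := by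
  intro l
  induction l with
  | nil => simp [gaps]
  | cons a t ih =>
    cases t with
    | nil => simp [gaps]
    | cons b r =>
      simp only [List.cons_append, gaps] at ih ⊢
      rw [ih]

lemma bmax_append (l : List Int) (hl : l ≠ []) (x : Int) : bmax (l ++ [x]) = max (bmax l) x := by
  cases l with
  | nil => exact absurd rfl hl
  | cons g t => simp [bmax, List.foldl_append]

def stepA : (Int × Int) → Int → Int → Int → (Int × Int) :=
  fun p _ a b =>
    let current := if b ≤ a then p.2 + 1 else 1
    (max p.1 current, current)

def stepB : List Int → Int → Int → Int → List Int :=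
  fun acc i a b => if a < b then acc ++ [i] else acc

lemma core :
    ∀ (xs : List Int) (x i m c lb : Int) (bounds : List Int),
    1 ≤ c → c ≤ m → c = i - lb → bounds ≠ [] →
    (∀ n : Int, i ≤ n → bmax (gaps (bounds ++ [n])) = max m (n - lb)) →
    (adjFoldI stepA (x :: xs) i (m, c)).1
      = bmax (gaps ((adjFoldI stepB (x :: xs) i bounds) ++ [i + (xs.length : Int)])) := by
  intro xs
  induction xs with
  | nil =>
    intro x i m c lb bounds h1 h2 h3 hne hinv
    have := hinv i le_rfl
    simp only [adjFoldI, List.length_nil, Nat.cast_zero, add_zero]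
    rw [this]
    omega
  | cons y ys ih =>
    intro x i m c lb bounds h1 h2 h3 hne hinv
    have hlen : i + ((y :: ys).length : Int) = (i + 1) + (ys.length : Int) := by
      simp only [List.length_cons]; push_cast; ring
    rw [show adjFoldI stepA (x :: y :: ys) i (m, c) = adjFoldI stepA (y :: ys) (i + 1) (stepA (m, c) i x y) from rfl,
      show adjFoldI stepB (x :: y :: ys) i bounds = adjFoldI stepB (y :: ys) (i + 1) (stepB bounds i x y) from rfl,
      hlen]
    by_cases hbr : y ≤ x
    · -- run continues
      have hA : stepA (m, c) i x y = (max m (c + 1), c + 1) := by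
        simp [stepA, hbr]
      have hB : stepB bounds i x y = bounds := by
        simp [stepB, not_lt.mpr hbr]
      rw [hA, hB]
      refine ih y (i + 1) (max m (c + 1)) (c + 1) lb bounds (by omega) (le_max_right _ _) (by omega) hne ?_
      intro n hn
      rw [hinv n (by omega)]
      have hc : c + 1 ≤ n - lb := by omega
      rw [max_assoc, max_eq_right hc]
    · -- break: strictly increasing step
      have hA : stepA (m, c) i x y = (max m 1, 1) := by
        simp [stepA, hbr]
      have hB : stepB bounds i x y = bounds ++ [i] := by
        simp [stepB, lt_of_not_ge hbr]
      rw [hA, hB]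
      refine ih y (i + 1) (max m 1) 1 i (bounds ++ [i]) le_rfl (le_max_right _ _) (by ring_nf) (by simp) ?_
      intro n hn
      rw [gaps_append_append, bmax_append]
      · rw [hinv i le_rfl]
        omega
      · -- gaps (bounds ++ [i]) ≠ []
        intro hcontra
        have := length_gaps (bounds ++ [i])
        rw [hcontra] at this
        simp at this
        cases bounds with
        | nil => exact hne rfl
        | cons a t => simp at this

-- ===== VERDICT (by name: the statement is the Claim_ definition above) =====
theorem find_min_length_spec : Claim_equal_find_min_length := by
  unfold Claim_equal_find_min_length Spec_find_min_length
  intro nums _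
  cases nums with
  | nil => decide
  | cons x xs =>
    have hA : find_min_length (x :: xs) = (adjFoldI stepA (x :: xs) 1 ((1 : Int), (1 : Int))).1 :=
      congrArg Prod.fst (foldl_pyRange_adj stepA (x :: xs) ((1 : Int), (1 : Int)))
    have hBb : (PySem.List.pyRange 1 (PySem.List.len (x :: xs)) 1).foldl
        (fun acc i => if PySem.List.pyGetD (x :: xs) (i - 1) 0 < PySem.List.pyGetD (x :: xs) i 0 then acc ++ [i] else acc)
        [(0 : Int)] = adjFoldI stepB (x :: xs) 1 [(0 : Int)] :=
      foldl_pyRange_adj stepB (x :: xs) [(0 : Int)]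
    have hmg : ∀ l : List Int, max_gap l = bmax (gaps l) := by
      intro l
      unfold max_gap
      rw [zip_diff_eq_gaps, max?_id_getD_eq_bmax]
    have hB : find_min_length_alt (x :: xs)
        = bmax (gaps (adjFoldI stepB (x :: xs) 1 [(0 : Int)] ++ [PySem.List.len (x :: xs)])) := by
      unfold find_min_length_alt
      rw [if_neg (List.cons_ne_nil x xs), hBb, hmg]
    rw [hA, hB,
      show PySem.List.len (x :: xs) = 1 + (xs.length : Int) from by
        simp only [PySem.List.len_eq, List.length_cons]; push_cast; ring]
    refine core xs x 1 1 1 0 [0] le_rfl le_rfl (by ring_nf) (by simp) ?_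
    intro n hn
    show bmax (gaps [0, n]) = max 1 (n - 0)
    simp only [gaps, bmax, List.foldl]
    omega
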